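-- pv_equiv track=rewrite | github.com/hitochan777/kata | atcoder/abc175/D.py | find_optimal_cost
-- ===== SOURCE A (Python) =====
-- def find_optimal_cost(costs, k):
--     cost = 0
--     m = len(costs)
--     sums = [0]
--     maxs = [-1000000000] * m
--     for i in range(m * 2):
--         sums.append(costs[i % m] + sums[-1])
--
--     for i in range(m):
--         for j in range(m):
--             maxs[j] = max(sums[i+j+1] - sums[i], maxs[j])
--
--     if sums[m] > 0:
--         cost += sums[m] * (k // m)
--
--     r = k % m
--     mx = -10000000000
--     for i in range(1, r + 1):
--         mx = max(mx, maxs[i - 1])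
--
--     cost += mx
--     return cost
-- ===== SOURCE B (Python) =====
-- def find_optimal_cost(costs, k):
--     m = len(costs)
--     total = sum(costs)
--     q, r = divmod(k, m)
--     base = total * q if total > 0 else 0
--     if r == 0:
--         return base
--     best = None
--     for i in range(m):
--         s = 0
--         for off in range(r):
--             s += costs[(i + off) % m]
--             if best is None or s > best:
--                 best = s
--     return base + best
-- ===== Notes on version B (the rewrite author's own statement) =====
-- stated objective: alternative
-- what changed: B drops A's 2m-entry prefix-sum list and the all-lengths maxs array: it accumulates each cyclic window sum directly, only for the r = k % m window lengths the answer uses, adding the full-cycle contribution via divmod; Pre_ excludes the empty list (A raises ZeroDivisionError, B too) and the corner k % len(costs) == 0, where A's final loop runs zero times and returns its -10**10 '-inf' initializer as a no-partial-window sentinel while B returns the full-cycles base alone - both conventions are defensible for this helper.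
-- intended difference: When every element is below -10**9 (and k % len(costs) != 0), A silently clamps the best window sum up to its maxs initializer -10**9 and returns base - 10**9, while B returns base plus the true (smaller) best window sum, the intended value. — e.g. on find_optimal_cost([-2000000000, -1500000000], 1): A returns -1000000000, B returns -1500000000
-- outside the precondition, e.g. on find_optimal_cost([5], 3): A returns -9999999985, B returns 15
import Mathlib
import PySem

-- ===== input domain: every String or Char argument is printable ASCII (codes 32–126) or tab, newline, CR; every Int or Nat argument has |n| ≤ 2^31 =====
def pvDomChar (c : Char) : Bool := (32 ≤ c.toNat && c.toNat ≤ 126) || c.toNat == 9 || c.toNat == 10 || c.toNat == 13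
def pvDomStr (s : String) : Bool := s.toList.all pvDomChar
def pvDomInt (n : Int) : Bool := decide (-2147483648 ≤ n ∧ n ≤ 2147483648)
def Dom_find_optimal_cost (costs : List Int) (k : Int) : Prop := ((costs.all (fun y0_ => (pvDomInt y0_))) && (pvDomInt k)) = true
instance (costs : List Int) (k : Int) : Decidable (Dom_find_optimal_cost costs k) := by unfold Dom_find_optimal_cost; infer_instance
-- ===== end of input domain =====

-- B replaces A's 2m-entry prefix-sum list and all-lengths maxima array by directly accumulating
-- each cyclic window sum, only for the r = k % m window lengths the answer uses (objective: alternative);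
-- on the exceptional inputs described at D_ below, A's sentinel initializers leak and B returns the intended value.


-- ===== PORT A =====
def find_optimal_cost (costs : List Int) (k : Int) : Int :=
  let cost : Int := 0
  let m : Int := (costs.length : Int)
  -- sums = [0]; for i in range(m*2): sums.append(costs[i % m] + sums[-1])
  let sums : List Int :=
    (PySem.List.pyRange 0 (m * 2) 1).foldl
      (fun sums i =>
        sums ++ [PySem.List.pyGetD costs (PySem.Int.mod i m) 0 + PySem.List.pyGetD sums (-1) 0])
      [(0 : Int)]
  -- maxs = [-1000000000] * m
  let maxs : List Int := List.replicate costs.length ((-1000000000 : Int))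
  -- for i in range(m): for j in range(m): maxs[j] = max(sums[i+j+1] - sums[i], maxs[j])
  let maxs2 : List Int :=
    (PySem.List.pyRange 0 m 1).foldl
      (fun a i =>
        (PySem.List.pyRange 0 m 1).foldl
          (fun a j =>
            PySem.List.pySetD a j
              (max (PySem.List.pyGetD sums (i + j + 1) 0 - PySem.List.pyGetD sums i 0)
                   (PySem.List.pyGetD a j 0)))
          a)
      maxs
  -- if sums[m] > 0: cost += sums[m] * (k // m)
  let cost2 : Int :=
    if PySem.List.pyGetD sums m 0 > 0 then
      cost + PySem.List.pyGetD sums m 0 * PySem.Int.floordiv k m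
    else cost
  -- r = k % m; mx = -10000000000; for i in range(1, r+1): mx = max(mx, maxs[i-1])
  let r : Int := PySem.Int.mod k m
  let mx : Int :=
    (PySem.List.pyRange 1 (r + 1) 1).foldl
      (fun mx i => max mx (PySem.List.pyGetD maxs2 (i - 1) 0))
      ((-10000000000 : Int))
  cost2 + mx

-- ===== PORT B =====
def find_optimal_cost_alt (costs : List Int) (k : Int) : Int :=
  let m : Int := (costs.length : Int)
  let total : Int := costs.sum
  let q : Int := PySem.Int.floordiv k m
  let r : Int := PySem.Int.mod k m
  let base : Int := if total > 0 then total * q else 0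
  if r = 0 then base
  else
    -- best = None; for i in range(m): s = 0; for off in range(r): s += costs[(i+off) % m]; update best
    let best : Option Int :=
      (PySem.List.pyRange 0 m 1).foldl
        (fun best i =>
          ((PySem.List.pyRange 0 r 1).foldl
            (fun sb off =>
              let s : Int := sb.1 + PySem.List.pyGetD costs (PySem.Int.mod (i + off) m) 0
              (s, match sb.2 with
                  | none => some s
                  | some b => if s > b then some s else some b))
            ((0 : Int), best)).2)
        (none : Option Int)
    -- 'return base + best'; best is some here since r ≥ 1 forces m ≥ 1, so both loops run
    base + best.getD 0

-- ===== PRECONDITION & SPEC =====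
-- Pre_ excludes the empty list, on which A raises ZeroDivisionError (B raises there too), and the corner
-- k % len(costs) == 0, where A's final loop runs zero times and returns its -10^10 '-inf' initializer as a
-- no-partial-window sentinel while B returns the full-cycles base alone — both conventions are defensible.
def Pre_find_optimal_cost (costs : List Int) (k : Int) : Prop :=
  costs ≠ [] ∧ PySem.Int.mod k (costs.length : Int) ≠ 0
instance (costs : List Int) (k : Int) : Decidable (Pre_find_optimal_cost costs k) := by
  unfold Pre_find_optimal_cost; infer_instance
def pvWitness_find_optimal_cost : List Int × Int := ([3, -1, 4], 7)

-- When every element is below -10^9 (and k % len(costs) ≠ 0), A silently clamps the best window sum up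
-- to its maxs initializer -10^9 and returns base - 10^9, while B returns base plus the true (smaller)
-- best window sum, the intended value.
def D_find_optimal_cost (costs : List Int) (k : Int) : Prop :=
  costs ≠ [] ∧ PySem.Int.mod k (costs.length : Int) ≠ 0 ∧ ∀ c ∈ costs, c < -1000000000
instance (costs : List Int) (k : Int) : Decidable (D_find_optimal_cost costs k) := by
  unfold D_find_optimal_cost; infer_instance

def Spec_find_optimal_cost (costs : List Int) (k : Int) (out : Int) : Prop :=
  ¬ D_find_optimal_cost costs k → out = find_optimal_cost_alt costs k
instance (costs : List Int) (k : Int) (out : Int) : Decidable (Spec_find_optimal_cost costs k out) := by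
  unfold Spec_find_optimal_cost; infer_instance

def pvDiffWitness_find_optimal_cost : List Int × Int := ([-2000000000, -1500000000], 1)
def pvDiffWitnessOut_find_optimal_cost : Int × Int := (-1000000000, -1500000000)

-- ===== CLAIM (what is proved, stated in full; the proofs are below) =====
def Claim_unchanged_find_optimal_cost : Prop := ∀ (costs : List Int) (k : Int), Dom_find_optimal_cost costs k → Pre_find_optimal_cost costs k → Spec_find_optimal_cost costs k (find_optimal_cost costs k)
def Claim_changed_find_optimal_cost : Prop := Dom_find_optimal_cost (pvDiffWitness_find_optimal_cost.1) (pvDiffWitness_find_optimal_cost.2) ∧ Pre_find_optimal_cost (pvDiffWitness_find_optimal_cost.1) (pvDiffWitness_find_optimal_cost.2) ∧ D_find_optimal_cost (pvDiffWitness_find_optimal_cost.1) (pvDiffWitness_find_optimal_cost.2) ∧ find_optimal_cost (pvDiffWitness_find_optimal_cost.1) (pvDiffWitness_find_optimal_cost.2) = pvDiffWitnessOut_find_optimal_cost.1 ∧ find_optimal_cost_alt (pvDiffWitness_find_optimal_cost.1) (pvDiffWitness_find_optimal_cost.2) = pvDiffWitnessOut_find_optimal_cost.2 ∧ pvDiffWitnessOut_find_optimal_cost.1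 ≠ pvDiffWitnessOut_find_optimal_cost.2
def Claim_exact_find_optimal_cost : Prop := ∀ (costs : List Int) (k : Int), Dom_find_optimal_cost costs k → Pre_find_optimal_cost costs k → D_find_optimal_cost costs k → find_optimal_cost costs k ≠ find_optimal_cost_alt costs k

-- ===== LEMMAS AND PROOFS =====

-- cyclic prefix sums: pvS costs n = sum of the first n entries of the infinite cyclic extension
def pvS (costs : List Int) : Nat → Int
  | 0 => 0
  | n + 1 => pvS costs n + costs.getD (n % costs.length) 0

-- cyclic window sum, start i, length j+1
def pvW (costs : List Int) (i j : Nat) : Int := pvS costs (i + j + 1) - pvS costs i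

-- A's per-length column maximum and final maximisation, as plain folds
def pvCol (costs : List Int) (j : Nat) : Int :=
  (List.range costs.length).foldl (fun acc2 i => max acc2 (pvW costs i j)) (-1000000000)
def pvAex (costs : List Int) (r : Nat) : Int :=
  (List.range r).foldl (fun acc j => max acc (pvCol costs j)) (-10000000000)

-- B's option-max step and its plain-fold characterisations
def pvOstep (o : Option Int) (v : Int) : Option Int :=
  match o with
  | none => some v
  | some b => if v > b then some v else some b

def pvRowF (costs : List Int) (r i : Nat) (b : Int) : Int :=
  (List.range r).foldl (fun a L => max a (pvW costs i L)) b
def pvRow0 (costs : List Int) (r : Nat) : Int :=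
  ((List.range (r - 1)).map Nat.succ).foldl (fun a L => max a (pvW costs 0 L)) (pvW costs 0 0)
def pvBP (costs : List Int) (r : Nat) : Int :=
  ((List.range (costs.length - 1)).map Nat.succ).foldl (fun b i => pvRowF costs r i b) (pvRow0 costs r)

theorem pv_getD_map_range (f : Nat → Int) (n k : Nat) (h : k < n) (d : Int) :
    ((List.range n).map f).getD k d = f k := by
  simp [List.getD, List.getElem?_map, List.getElem?_range, h]

theorem pv_set_map_range (f : Nat → Int) (m s : Nat) (v : Int) (hs : s < m) :
    ((List.range m).map f).set s v
      = (List.range m).map (fun j => if j = s then v else f j) := by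
  apply List.ext_getElem
  · simp
  · intro i h1 h2
    simp only [List.getElem_set, List.getElem_map, List.getElem_range]
    by_cases h : s = i
    · subst h; simp
    · rw [if_neg h, if_neg (fun hh => h hh.symm)]

theorem pv_sums_spec (costs : List Int) (n : Nat) :
    (PySem.List.pyRange 0 (n : Int) 1).foldl
      (fun sums i =>
        sums ++ [PySem.List.pyGetD costs (PySem.Int.mod i (costs.length : Int)) 0
                 + PySem.List.pyGetD sums (-1) 0])
      [(0 : Int)]
    = (List.range (n + 1)).map (pvS costs) := by
  induction n with
  | zero =>
    simp [PySem.List.pyRange_one_eq_nil, pvS]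
  | succ n ih =>
    have hcast : ((n + 1 : Nat) : Int) = (n : Int) + 1 := by push_cast; ring
    rw [hcast, PySem.List.pyRange_one_succ_right (by positivity), List.foldl_append, ih]
    have hsplit : (List.range (n + 1)).map (pvS costs)
        = (List.range n).map (pvS costs) ++ [pvS costs n] := by
      rw [List.range_succ, List.map_append]; rfl
    rw [hsplit]
    simp only [List.foldl_cons, List.foldl_nil, PySem.List.pyGetD_neg_one_append_singleton]
    rw [PySem.Int.mod_natCast, PySem.List.pyGetD_natCast]
    have : (List.range (n + 1 + 1)).map (pvS costs)
        = (List.range (n + 1)).map (pvS costs) ++ [pvS costs (n + 1)] := by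
      rw [List.range_succ, List.map_append]; rfl
    rw [this, hsplit]
    simp [pvS, List.getD]
    ring

theorem pv_inner (F : Int → Int) (g : Nat → Int) (M : Nat) :
    ∀ (t s : Nat), s + t = M →
    (PySem.List.pyRange (s : Int) (M : Int) 1).foldl
      (fun a j => PySem.List.pySetD a j (max (F j) (PySem.List.pyGetD a j 0)))
      ((List.range M).map (fun (j : Nat) => if j < s then max (F (j : Int)) (g j) else g j))
    = (List.range M).map (fun (j : Nat) => max (F (j : Int)) (g j)) := by
  intro t
  induction t with
  | zero =>
    intro s hs
    rw [PySem.List.pyRange_one_eq_nil (by exact_mod_cast (by omega : M ≤ s))]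
    simp only [List.foldl_nil]
    apply List.map_congr_left
    intro j hj
    simp only [List.mem_range] at hj
    rw [if_pos (by omega)]
  | succ t ih =>
    intro s hs
    have hsM : s < M := by omega
    rw [PySem.List.pyRange_one_cons (by exact_mod_cast hsM), List.foldl_cons]
    rw [PySem.List.pyGetD_natCast, pv_getD_map_range _ _ _ hsM, if_neg (by omega)]
    rw [PySem.List.pySetD_natCast, pv_set_map_range _ _ _ _ hsM]
    have hstate : (List.range M).map
          (fun j => if j = s then max (F (s : Int)) (g s)
                    else if j < s then max (F (j : Int)) (g j) else g j)
        = (List.range M).map (fun j => if j < s + 1 then max (F (j : Int)) (g j) else g j) := by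
      apply List.map_congr_left
      intro j hj
      by_cases h1 : j = s
      · subst h1; rw [if_pos rfl, if_pos (by omega)]
      · rw [if_neg h1]
        by_cases h2 : j < s
        · rw [if_pos h2, if_pos (by omega)]
        · rw [if_neg h2, if_neg (by omega)]
    have hcast : ((s : Int) + 1) = ((s + 1 : Nat) : Int) := by push_cast; ring
    rw [hstate, hcast]
    exact ih (s + 1) (by omega)

theorem pv_outer (F : Int → Int → Int) (M : Nat) (n : Nat) :
    (PySem.List.pyRange 0 (n : Int) 1).foldl
      (fun a i =>
        (PySem.List.pyRange 0 (M : Int) 1).foldl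
          (fun a j => PySem.List.pySetD a j (max (F i j) (PySem.List.pyGetD a j 0))) a)
      (List.replicate M ((-1000000000 : Int)))
    = (List.range M).map
        (fun (j : Nat) => (List.range n).foldl
          (fun acc (i : Nat) => max (F (i : Int) (j : Int)) acc) (-1000000000)) := by
  induction n with
  | zero =>
    rw [show ((0 : Nat) : Int) = 0 by norm_num]
    rw [PySem.List.pyRange_one_eq_nil (a := 0) (b := 0) le_rfl, List.foldl_nil]
    apply List.ext_getElem
    · simp
    · intro i h1 h2; simp
  | succ n ih =>
    have hcast : ((n + 1 : Nat) : Int) = (n : Int) + 1 := by push_cast; ring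
    rw [hcast, PySem.List.pyRange_one_succ_right (by positivity), List.foldl_append, ih,
        List.foldl_cons, List.foldl_nil]
    have hstart : (List.range M).map
          (fun (j : Nat) => (List.range n).foldl (fun acc (i : Nat) => max (F (i : Int) (j : Int)) acc) (-1000000000))
        = (List.range M).map
            (fun (j : Nat) => if j < 0 then max (F (n : Int) (j : Int))
                ((List.range n).foldl (fun acc (i : Nat) => max (F (i : Int) (j : Int)) acc) (-1000000000))
              else (List.range n).foldl (fun acc (i : Nat) => max (F (i : Int) (j : Int)) acc) (-1000000000)) := by
      apply List.map_congr_left; intro j hj; rw [if_neg (by omega)]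
    rw [hstart]
    have := pv_inner (fun j => F (n : Int) j)
      (fun (j : Nat) => (List.range n).foldl (fun acc (i : Nat) => max (F (i : Int) (j : Int)) acc) (-1000000000)) M M 0 (by omega)
    rw [Nat.cast_zero] at this
    rw [this]
    apply List.map_congr_left
    intro j hj
    rw [List.range_succ, List.foldl_append, List.foldl_cons, List.foldl_nil]

-- fold-max helper lemmas
theorem pv_fmax_init_le {α : Type} (g : α → Int) (l : List α) (init : Int) :
    init ≤ l.foldl (fun a x => max a (g x)) init := by
  induction l generalizing init with
  | nil => simp
  | cons y l ih =>
    simp only [List.foldl_cons]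
    exact le_trans (le_max_left _ _) (ih (max init (g y)))

theorem pv_fmax_mem_le {α : Type} (g : α → Int) (l : List α) (init : Int) (x : α) (hx : x ∈ l) :
    g x ≤ l.foldl (fun a x => max a (g x)) init := by
  induction l generalizing init with
  | nil => cases hx
  | cons y l ih =>
    simp only [List.foldl_cons]
    rcases List.mem_cons.mp hx with h | h
    · subst h; exact le_trans (le_max_right _ _) (pv_fmax_init_le g l _)
    · exact ih _ h

theorem pv_fmax_le {α : Type} (g : α → Int) (l : List α) (init z : Int)
    (h0 : init ≤ z) (h : ∀ x ∈ l, g x ≤ z) :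
    l.foldl (fun a x => max a (g x)) init ≤ z := by
  induction l generalizing init with
  | nil => simpa using h0
  | cons y l ih =>
    simp only [List.foldl_cons]
    exact ih _ (max_le h0 (h y List.mem_cons_self)) (fun x hx => h x (List.mem_cons_of_mem _ hx))

theorem pv_foldl_mono_init_le {α : Type} (f : Int → α → Int) (hf : ∀ a x, a ≤ f a x)
    (l : List α) (init : Int) : init ≤ l.foldl f init := by
  induction l generalizing init with
  | nil => simp
  | cons y l ih => exact le_trans (hf init y) (ih _)

theorem pv_foldl_elem_bound {α : Type} (f : Int → α → Int) (hf : ∀ a x, a ≤ f a x)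
    (l : List α) (init c : Int) (x : α) (hx : x ∈ l) (hc : ∀ a, c ≤ f a x) :
    c ≤ l.foldl f init := by
  induction l generalizing init with
  | nil => cases hx
  | cons y l ih =>
    simp only [List.foldl_cons]
    rcases List.mem_cons.mp hx with h | h
    · subst h; exact le_trans (hc init) (pv_foldl_mono_init_le f hf l _)
    · exact ih _ h

theorem pv_foldl_le_of {α : Type} (f : Int → α → Int) (l : List α) (init z : Int)
    (h0 : init ≤ z) (h : ∀ a, a ≤ z → ∀ x ∈ l, f a x ≤ z) :
    l.foldl f init ≤ z := by
  induction l generalizing init with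
  | nil => simpa using h0
  | cons y l ih =>
    simp only [List.foldl_cons]
    exact ih _ (h init h0 y List.mem_cons_self) (fun a ha x hx => h a ha x (List.mem_cons_of_mem _ hx))

-- pvS over one full period is the list sum
theorem pv_S_take (costs : List Int) (n : Nat) (hn : n ≤ costs.length) :
    pvS costs n = (costs.take n).sum := by
  induction n with
  | zero => simp [pvS]
  | succ n ih =>
    have hn' : n < costs.length := by omega
    rw [pvS, ih (by omega), List.sum_take_succ _ _ hn']
    simp [List.getD, hn', Nat.mod_eq_of_lt hn']

theorem pv_S_length (costs : List Int) : pvS costs costs.length = costs.sum := by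
  rw [pv_S_take costs costs.length le_rfl, List.take_length]

theorem pv_S_succ (costs : List Int) (n : Nat) :
    pvS costs (n + 1) = pvS costs n + costs.getD (n % costs.length) 0 := rfl

theorem pv_W_zero (costs : List Int) (i : Nat) :
    pvW costs i 0 = costs.getD (i % costs.length) 0 := by
  unfold pvW
  rw [show i + 0 + 1 = i + 1 from rfl, pv_S_succ]
  ring

-- closed form for A (nonempty costs)
theorem pv_A_closed (costs : List Int) (k : Int) (hm : costs ≠ []) :
    find_optimal_cost costs k
      = (if costs.sum > 0 then costs.sum * PySem.Int.floordiv k (costs.length : Int) else 0)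
        + pvAex costs (PySem.Int.mod k (costs.length : Int)).toNat := by
  have hMpos : 0 < costs.length := List.length_pos_iff.mpr hm
  have hmpos : (0 : Int) < (costs.length : Int) := by exact_mod_cast hMpos
  have hrlt : PySem.Int.mod k (costs.length : Int) < (costs.length : Int) :=
    PySem.Int.mod_lt k hmpos
  have hr0 : 0 ≤ PySem.Int.mod k (costs.length : Int) := PySem.Int.mod_nonneg k hmpos
  simp only [find_optimal_cost, pvAex, pvCol]
  have hsums : (PySem.List.pyRange 0 ((costs.length : Int) * 2) 1).foldl
      (fun sums i =>
        sums ++ [PySem.List.pyGetD costs (PySem.Int.mod i (costs.length : Int)) 0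
                 + PySem.List.pyGetD sums (-1) 0])
      [(0 : Int)]
      = (List.range (2 * costs.length + 1)).map (pvS costs) := by
    rw [show ((costs.length : Int) * 2) = ((2 * costs.length : Nat) : Int) by push_cast; ring]
    exact pv_sums_spec costs (2 * costs.length)
  rw [hsums]
  have houter : (PySem.List.pyRange 0 (costs.length : Int) 1).foldl
      (fun a i => (PySem.List.pyRange 0 (costs.length : Int) 1).foldl
        (fun a j => PySem.List.pySetD a j
          (max (PySem.List.pyGetD ((List.range (2 * costs.length + 1)).map (pvS costs)) (i + j + 1) 0
                - PySem.List.pyGetD ((List.range (2 * costs.length + 1)).map (pvS costs)) i 0)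
               (PySem.List.pyGetD a j 0))) a)
      (List.replicate costs.length ((-1000000000 : Int)))
      = (List.range costs.length).map
          (fun (j : Nat) => (List.range costs.length).foldl
            (fun acc (i : Nat) =>
              max (PySem.List.pyGetD ((List.range (2 * costs.length + 1)).map (pvS costs)) ((i : Int) + (j : Int) + 1) 0
                   - PySem.List.pyGetD ((List.range (2 * costs.length + 1)).map (pvS costs)) (i : Int) 0) acc)
            (-1000000000)) :=
    pv_outer _ costs.length costs.length
  rw [houter]
  have hcol : (List.range costs.length).map
        (fun (j : Nat) => (List.range costs.length).foldl
          (fun acc (i : Nat) =>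
            max (PySem.List.pyGetD ((List.range (2 * costs.length + 1)).map (pvS costs)) ((i : Int) + (j : Int) + 1) 0
                 - PySem.List.pyGetD ((List.range (2 * costs.length + 1)).map (pvS costs)) (i : Int) 0) acc)
          (-1000000000))
      = (List.range costs.length).map
          (fun (j : Nat) => (List.range costs.length).foldl
            (fun acc2 (i : Nat) => max acc2 (pvW costs i j)) (-1000000000)) := by
    apply List.map_congr_left
    intro j hj
    simp only [List.mem_range] at hj
    apply PySem.List.foldl_congr_mem
    intro acc i hi
    simp only [List.mem_range] at hi
    rw [show (i : Int) + (j : Int) + 1 = ((i + j + 1 : Nat) : Int) by push_cast; ring,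
        PySem.List.pyGetD_natCast, PySem.List.pyGetD_natCast,
        pv_getD_map_range _ _ _ (by omega), pv_getD_map_range _ _ _ (by omega),
        max_comm]
    rfl
  rw [hcol]
  have hsm : PySem.List.pyGetD ((List.range (2 * costs.length + 1)).map (pvS costs)) ((costs.length : Nat) : Int) 0 = costs.sum := by
    rw [PySem.List.pyGetD_natCast, pv_getD_map_range _ _ _ (by omega), pv_S_length]
  rw [hsm]
  have hmx : (PySem.List.pyRange 1 (PySem.Int.mod k (costs.length : Int) + 1) 1).foldl
      (fun mx i => max mx (PySem.List.pyGetD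
        ((List.range costs.length).map
          (fun (j : Nat) => (List.range costs.length).foldl
            (fun acc2 (i : Nat) => max acc2 (pvW costs i j)) (-1000000000))) (i - 1) 0))
      ((-10000000000 : Int))
      = (List.range (PySem.Int.mod k (costs.length : Int)).toNat).foldl
          (fun acc j =>
            max acc ((List.range costs.length).foldl
              (fun acc2 i => max acc2 (pvW costs i j)) (-1000000000)))
          (-10000000000) := by
    rw [PySem.List.pyRange_one 1 _, List.foldl_map]
    rw [show ((PySem.Int.mod k (costs.length : Int) + 1 - 1).toNat)
        = (PySem.Int.mod k (costs.length : Int)).toNat by omega]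
    apply PySem.List.foldl_congr_mem
    intro acc x hx
    simp only [List.mem_range] at hx
    have hxM : x < costs.length := by omega
    rw [show (1 : Int) + (x : Int) - 1 = ((x : Nat) : Int) by push_cast; ring,
        PySem.List.pyGetD_natCast, pv_getD_map_range _ _ _ hxM]
  rw [hmx]
  congr 1
  split_ifs <;> ring

-- B's inner loop: pair of running sum and option-best, characterised as plain folds
theorem pv_B_inner_opt (costs : List Int) (i : Nat) (r : Nat) (o : Option Int) :
    ((PySem.List.pyRange 0 (r : Int) 1).foldl
      (fun sb off =>
        ((sb.1 + PySem.List.pyGetD costs (PySem.Int.mod ((i : Int) + off) (costs.length : Int)) 0),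
         match sb.2 with
         | none => some (sb.1 + PySem.List.pyGetD costs (PySem.Int.mod ((i : Int) + off) (costs.length : Int)) 0)
         | some b => if sb.1 + PySem.List.pyGetD costs (PySem.Int.mod ((i : Int) + off) (costs.length : Int)) 0 > b
                     then some (sb.1 + PySem.List.pyGetD costs (PySem.Int.mod ((i : Int) + off) (costs.length : Int)) 0)
                     else some b))
      ((0 : Int), o))
    = (pvS costs (i + r) - pvS costs i,
       (List.range r).foldl (fun o L => pvOstep o (pvW costs i L)) o) := by
  induction r with
  | zero =>
    rw [show ((0 : Nat) : Int) = 0 by norm_num,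
        PySem.List.pyRange_one_eq_nil (a := 0) (b := 0) le_rfl]
    simp
  | succ r ih =>
    have hcast : ((r + 1 : Nat) : Int) = (r : Int) + 1 := by push_cast; ring
    rw [hcast, PySem.List.pyRange_one_succ_right (by positivity), List.foldl_append, ih,
        List.foldl_cons, List.foldl_nil]
    have hmod : PySem.Int.mod ((i : Int) + (r : Int)) ((costs.length : Int))
        = (((i + r) % costs.length : Nat) : Int) := by
      rw [show (i : Int) + (r : Int) = ((i + r : Nat) : Int) by push_cast; ring,
          PySem.Int.mod_natCast]
    rw [hmod, PySem.List.pyGetD_natCast]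
    have hpw : pvS costs (i + r) - pvS costs i + costs.getD ((i + r) % costs.length) 0
        = pvW costs i r := by
      unfold pvW
      rw [pv_S_succ costs (i + r)]
      ring
    have hT : pvS costs (i + r) - pvS costs i + costs.getD ((i + r) % costs.length) 0
        = pvS costs (i + (r + 1)) - pvS costs i := by
      have h1 : i + (r + 1) = (i + r) + 1 := rfl
      rw [h1, pv_S_succ]; ring
    refine Prod.ext ?_ ?_
    · simpa using hT
    · simp only []
      rw [List.range_succ, List.foldl_append, List.foldl_cons, List.foldl_nil]
      rw [hpw]
      rfl

theorem pv_ofold_some (costs : List Int) (i : Nat) (l : List Nat) (b : Int) :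
    l.foldl (fun o L => pvOstep o (pvW costs i L)) (some b)
      = some (l.foldl (fun a L => max a (pvW costs i L)) b) := by
  induction l generalizing b with
  | nil => rfl
  | cons y l ih =>
    simp only [List.foldl_cons]
    have : pvOstep (some b) (pvW costs i y) = some (max b (pvW costs i y)) := by
      show (if pvW costs i y > b then some (pvW costs i y) else some b) = some (max b (pvW costs i y))
      by_cases h : pvW costs i y > b
      · rw [if_pos h, max_eq_right (le_of_lt h)]
      · rw [if_neg h, max_eq_left (not_lt.mp h)]
    rw [this, ih]

theorem pv_ofold_outer (costs : List Int) (r : Nat) (l : List Nat) (b : Int) :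
    l.foldl (fun o i => (List.range r).foldl (fun o L => pvOstep o (pvW costs i L)) o) (some b)
      = some (l.foldl (fun b i => pvRowF costs r i b) b) := by
  induction l generalizing b with
  | nil => rfl
  | cons y l ih =>
    simp only [List.foldl_cons]
    rw [pv_ofold_some]
    exact ih _

-- closed form for B when r ≥ 1 (then m ≥ 1 as well)
theorem pv_B_closed_pos (costs : List Int) (k : Int) (hm : costs ≠ [])
    (hr : PySem.Int.mod k (costs.length : Int) ≠ 0) :
    find_optimal_cost_alt costs k
      = (if costs.sum > 0 then costs.sum * PySem.Int.floordiv k (costs.length : Int) else 0)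
        + pvBP costs (PySem.Int.mod k (costs.length : Int)).toNat := by
  have hMpos : 0 < costs.length := List.length_pos_iff.mpr hm
  have hmpos : (0 : Int) < (costs.length : Int) := by exact_mod_cast hMpos
  have hr0 : 0 ≤ PySem.Int.mod k (costs.length : Int) := PySem.Int.mod_nonneg k hmpos
  set rI := PySem.Int.mod k (costs.length : Int) with hrI
  have hrn1 : 1 ≤ rI.toNat := by omega
  have hrcast : ((rI.toNat : Int)) = rI := Int.toNat_of_nonneg hr0
  simp only [find_optimal_cost_alt]
  rw [if_neg hr]
  have hbest : (PySem.List.pyRange 0 (costs.length : Int) 1).foldl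
      (fun best i =>
        ((PySem.List.pyRange 0 rI 1).foldl
          (fun sb off =>
            ((sb.1 + PySem.List.pyGetD costs (PySem.Int.mod (i + off) (costs.length : Int)) 0),
             match sb.2 with
             | none => some (sb.1 + PySem.List.pyGetD costs (PySem.Int.mod (i + off) (costs.length : Int)) 0)
             | some b => if sb.1 + PySem.List.pyGetD costs (PySem.Int.mod (i + off) (costs.length : Int)) 0 > b
                         then some (sb.1 + PySem.List.pyGetD costs (PySem.Int.mod (i + off) (costs.length : Int)) 0)
                         else some b))
          ((0 : Int), best)).2)
      (none : Option Int)
      = some (pvBP costs rI.toNat) := by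
    rw [PySem.List.pyRange_one 0 (costs.length : Int), List.foldl_map]
    rw [show (((costs.length : Int) - 0).toNat) = costs.length by simp]
    have hstep : ∀ (o : Option Int), ∀ i ∈ List.range costs.length,
        ((PySem.List.pyRange 0 rI 1).foldl
          (fun sb off =>
            ((sb.1 + PySem.List.pyGetD costs (PySem.Int.mod ((0 : Int) + (i : Int) + off) (costs.length : Int)) 0),
             match sb.2 with
             | none => some (sb.1 + PySem.List.pyGetD costs (PySem.Int.mod ((0 : Int) + (i : Int) + off) (costs.length : Int)) 0)
             | some b => if sb.1 + PySem.List.pyGetD costs (PySem.Int.mod ((0 : Int) + (i : Int) + off) (costs.length : Int)) 0 > b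
                         then some (sb.1 + PySem.List.pyGetD costs (PySem.Int.mod ((0 : Int) + (i : Int) + off) (costs.length : Int)) 0)
                         else some b))
          ((0 : Int), o)).2
        = (List.range rI.toNat).foldl (fun o L => pvOstep o (pvW costs i L)) o := by
      intro o i _
      have := pv_B_inner_opt costs i rI.toNat o
      rw [hrcast] at this
      have h0 : ∀ off : Int, (0 : Int) + (i : Int) + off = (i : Int) + off := by intro off; ring
      simp only [h0]
      exact congrArg Prod.snd this
    rw [PySem.List.foldl_congr_mem (List.range costs.length)
      (f := fun o (i : Nat) =>
        ((PySem.List.pyRange 0 rI 1).foldl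
          (fun sb off =>
            ((sb.1 + PySem.List.pyGetD costs (PySem.Int.mod ((0 : Int) + (i : Int) + off) (costs.length : Int)) 0),
             match sb.2 with
             | none => some (sb.1 + PySem.List.pyGetD costs (PySem.Int.mod ((0 : Int) + (i : Int) + off) (costs.length : Int)) 0)
             | some b => if sb.1 + PySem.List.pyGetD costs (PySem.Int.mod ((0 : Int) + (i : Int) + off) (costs.length : Int)) 0 > b
                         then some (sb.1 + PySem.List.pyGetD costs (PySem.Int.mod ((0 : Int) + (i : Int) + off) (costs.length : Int)) 0)
                         else some b))
          ((0 : Int), o)).2)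
      (g := fun o (i : Nat) => (List.range rI.toNat).foldl (fun o L => pvOstep o (pvW costs i L)) o)
      (none : Option Int) hstep]
    rw [show costs.length = (costs.length - 1) + 1 by omega, List.range_succ_eq_map,
        List.foldl_cons]
    have hhead : (List.range rI.toNat).foldl (fun o L => pvOstep o (pvW costs 0 L)) none
        = some (pvRow0 costs rI.toNat) := by
      rw [show rI.toNat = (rI.toNat - 1) + 1 by omega, List.range_succ_eq_map, List.foldl_cons]
      rw [show (pvOstep none (pvW costs 0 0)) = some (pvW costs 0 0) from rfl, pv_ofold_some]
      rw [pvRow0, show (rI.toNat - 1) + 1 - 1 = rI.toNat - 1 by omega]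
    rw [hhead, pv_ofold_outer, pvBP]
  rw [hbest]
  rfl

-- every cyclic window with start < m and length ≤ r is ≤ pvBP
theorem pv_W_le_BP (costs : List Int) (r : Nat) (hr : 1 ≤ r)
    (i : Nat) (hi : i < costs.length) (L : Nat) (hL : L < r) :
    pvW costs i L ≤ pvBP costs r := by
  have hmono : ∀ (b : Int) (i : Nat), b ≤ pvRowF costs r i b := by
    intro b i; exact pv_fmax_init_le _ _ _
  by_cases h0 : i = 0
  · subst h0
    have h1 : pvW costs 0 L ≤ pvRow0 costs r := by
      unfold pvRow0
      by_cases hL0 : L = 0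
      · subst hL0; exact pv_fmax_init_le _ _ _
      · apply pv_fmax_mem_le
        simp only [List.mem_map, List.mem_range]
        exact ⟨L - 1, by omega, by omega⟩
    calc pvW costs 0 L ≤ pvRow0 costs r := h1
      _ ≤ pvBP costs r := pv_foldl_mono_init_le _ (fun a x => hmono a x) _ _
  · unfold pvBP
    apply pv_foldl_elem_bound _ (fun a x => hmono a x) _ _ _ i
    · simp only [List.mem_map, List.mem_range]
      exact ⟨i - 1, by omega, by omega⟩
    · intro a
      apply pv_fmax_mem_le
      simp only [List.mem_range]
      exact hL

-- pvBP is bounded by any bound on all those windows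
theorem pv_BP_le (costs : List Int) (r : Nat) (hm : costs ≠ []) (hr : 1 ≤ r) (z : Int)
    (h : ∀ i < costs.length, ∀ L < r, pvW costs i L ≤ z) :
    pvBP costs r ≤ z := by
  have hM : 0 < costs.length := List.length_pos_iff.mpr hm
  unfold pvBP
  apply pv_foldl_le_of
  · unfold pvRow0
    apply pv_fmax_le
    · exact h 0 hM 0 hr
    · intro L hL
      simp only [List.mem_map, List.mem_range] at hL
      obtain ⟨y, hy, rfl⟩ := hL
      exact h 0 hM _ (by omega)
  · intro a ha i hiL
    simp only [List.mem_map, List.mem_range] at hiL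
    obtain ⟨y, hy, rfl⟩ := hiL
    apply pv_fmax_le _ _ _ _ ha
    intro L hL
    simp only [List.mem_range] at hL
    exact h _ (by omega) L hL

theorem pv_W_le_Aex (costs : List Int) (r : Nat)
    (i : Nat) (hi : i < costs.length) (L : Nat) (hL : L < r) :
    pvW costs i L ≤ pvAex costs r := by
  have h1 : pvW costs i L ≤ pvCol costs L := by
    unfold pvCol
    exact pv_fmax_mem_le _ _ _ i (List.mem_range.mpr hi)
  have h2 : pvCol costs L ≤ pvAex costs r := by
    unfold pvAex
    exact pv_fmax_mem_le _ _ _ L (List.mem_range.mpr hL)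
  omega

theorem pv_neg9_le_Aex (costs : List Int) (r : Nat) (hr : 1 ≤ r) :
    (-1000000000 : Int) ≤ pvAex costs r := by
  have h1 : (-1000000000 : Int) ≤ pvCol costs 0 := pv_fmax_init_le _ _ _
  have h2 : pvCol costs 0 ≤ pvAex costs r := by
    unfold pvAex
    exact pv_fmax_mem_le _ _ _ 0 (List.mem_range.mpr (by omega))
  omega

theorem pv_Aex_le (costs : List Int) (r : Nat) (z : Int) (hz : (-1000000000 : Int) ≤ z)
    (h : ∀ i < costs.length, ∀ L < r, pvW costs i L ≤ z) :
    pvAex costs r ≤ z := by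
  unfold pvAex
  apply pv_fmax_le _ _ _ _ (by omega)
  intro j hj
  simp only [List.mem_range] at hj
  unfold pvCol
  apply pv_fmax_le _ _ _ _ hz
  intro i hi
  simp only [List.mem_range] at hi
  exact h i hi j hj

-- the element witness: every list element is a length-1 window
theorem pv_elem_window (costs : List Int) (c : Int) (hc : c ∈ costs) :
    ∃ i < costs.length, pvW costs i 0 = c := by
  obtain ⟨i, hi, rfl⟩ := List.mem_iff_getElem.mp hc
  refine ⟨i, hi, ?_⟩
  rw [pv_W_zero, Nat.mod_eq_of_lt hi]
  exact List.getD_eq_getElem costs 0 hi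

-- the two maximisations agree when r ≥ 1 and some element is ≥ -10^9
theorem pv_Aex_eq_BP (costs : List Int) (r : Nat) (hm : costs ≠ []) (hr : 1 ≤ r)
    (hw : ∃ c ∈ costs, (-1000000000 : Int) ≤ c) :
    pvAex costs r = pvBP costs r := by
  obtain ⟨c, hc, hcge⟩ := hw
  obtain ⟨i0, hi0, hW0⟩ := pv_elem_window costs c hc
  have hBP9 : (-1000000000 : Int) ≤ pvBP costs r := by
    have := pv_W_le_BP costs r hr i0 hi0 0 hr
    omega
  apply le_antisymm
  · exact pv_Aex_le costs r _ hBP9 (fun i hi L hL => pv_W_le_BP costs r hr i hi L hL)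
  · exact pv_BP_le costs r hm hr _ (fun i hi L hL => pv_W_le_Aex costs r i hi L hL)

-- when every element is below -10^9, every window is ≤ -10^9 - 1
theorem pv_W_small (costs : List Int) (hm : costs ≠ [])
    (hall : ∀ c ∈ costs, c < -1000000000) (i L : Nat) :
    pvW costs i L ≤ -1000000001 := by
  have hM : 0 < costs.length := List.length_pos_iff.mpr hm
  induction L with
  | zero =>
    rw [pv_W_zero]
    have hlt : i % costs.length < costs.length := Nat.mod_lt _ hM
    rw [List.getD_eq_getElem costs 0 hlt]
    have := hall _ (List.getElem_mem hlt)
    omega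
  | succ L ih =>
    have hstep : pvW costs i (L + 1)
        = pvW costs i L + costs.getD ((i + L + 1) % costs.length) 0 := by
      unfold pvW
      rw [show i + (L + 1) + 1 = (i + L + 1) + 1 from by omega, pv_S_succ]
      ring
    have hlt : (i + L + 1) % costs.length < costs.length := Nat.mod_lt _ hM
    rw [hstep, List.getD_eq_getElem costs 0 hlt]
    have := hall _ (List.getElem_mem hlt)
    omega

-- ===== VERDICT (by name: the statement is the Claim_ definition above) =====
theorem find_optimal_cost_spec : Claim_unchanged_find_optimal_cost := by
  intro costs k _ hpre
  unfold Spec_find_optimal_cost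
  intro hnD
  obtain ⟨hm, hr⟩ := hpre
  unfold D_find_optimal_cost at hnD
  push_neg at hnD
  obtain ⟨c, hc, hcge⟩ := hnD hm hr
  have hMpos : 0 < costs.length := List.length_pos_iff.mpr hm
  have hmpos : (0 : Int) < (costs.length : Int) := by exact_mod_cast hMpos
  have hr0 : 0 ≤ PySem.Int.mod k (costs.length : Int) := PySem.Int.mod_nonneg k hmpos
  have hrn1 : 1 ≤ (PySem.Int.mod k (costs.length : Int)).toNat := by omega
  rw [pv_A_closed costs k hm, pv_B_closed_pos costs k hm hr]
  congr 1
  exact pv_Aex_eq_BP costs _ hm hrn1 ⟨c, hc, by omega⟩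

theorem find_optimal_cost_changed : Claim_changed_find_optimal_cost := by
  unfold Claim_changed_find_optimal_cost; decide

theorem find_optimal_cost_tight : Claim_exact_find_optimal_cost := by
  intro costs k _ _hpre hD
  obtain ⟨hm, hr, hall⟩ := hD
  have hMpos : 0 < costs.length := List.length_pos_iff.mpr hm
  have hmpos : (0 : Int) < (costs.length : Int) := by exact_mod_cast hMpos
  have hr0 : 0 ≤ PySem.Int.mod k (costs.length : Int) := PySem.Int.mod_nonneg k hmpos
  have hrn1 : 1 ≤ (PySem.Int.mod k (costs.length : Int)).toNat := by omega
  rw [pv_A_closed costs k hm, pv_B_closed_pos costs k hm hr]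
  have hA9 : (-1000000000 : Int) ≤ pvAex costs (PySem.Int.mod k (costs.length : Int)).toNat :=
    pv_neg9_le_Aex costs _ hrn1
  have hB9 : pvBP costs (PySem.Int.mod k (costs.length : Int)).toNat ≤ -1000000001 :=
    pv_BP_le costs _ hm hrn1 _ (fun i _ L _ => pv_W_small costs hm hall i L)
  omega
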